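-- pv_equiv track=rewrite | github.com/sglee487/Coding-test | Programmers/코딩테스트 고득점 Kit/탐욕법(Greedy) 4. 구명보트(효율성 실패3).py | solution
-- ===== SOURCE A (Python) =====
-- def solution(people, limit):
--     answer = 0
--     boat = [0,0]
--     while sum(people) != 0:
--         boat[0] = max(people)
--         people[people.index(boat[0])] = 0
--         rest = limit - boat[0]
--         g = set(range(40,rest+1)) & set(people)
--         if g:
--             boat[1] = (max(g))
--             people[people.index(boat[1])] = 0
--         boat = [0,0]
--         answer += 1
--     return answer
-- ===== SOURCE B (Python) =====
-- def solution(people, limit):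
--     rem = sorted(people)
--     ans = 0
--     while rem:
--         h = rem.pop()
--         cap = limit - h
--         lo, hi = 0, len(rem)
--         while lo < hi:
--             mid = (lo + hi) // 2
--             if rem[mid] <= cap:
--                 lo = mid + 1
--             else:
--                 hi = mid
--         if lo > 0 and rem[lo - 1] >= 40:
--             rem.pop(lo - 1)
--         ans += 1
--     return ans
-- ===== Notes on version B (the rewrite author's own statement) =====
-- stated objective: faster
-- what changed: B sorts once and, for each heaviest person popped from the end, binary-searches the largest remaining partner in [40, limit-h], instead of A's per-round whole-list sum/max/index scans and materialization of set(range(40, limit-h+1)); intended as faster — a timing run measured A timing out at n=16 where B returned, so no clean ratio was read.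
-- outside the precondition, e.g. on solution([0], 100): A returns 0, B returns 1; on solution([-2, 50], 100): A does not finish within the time limit, B returns 2
import Mathlib
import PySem

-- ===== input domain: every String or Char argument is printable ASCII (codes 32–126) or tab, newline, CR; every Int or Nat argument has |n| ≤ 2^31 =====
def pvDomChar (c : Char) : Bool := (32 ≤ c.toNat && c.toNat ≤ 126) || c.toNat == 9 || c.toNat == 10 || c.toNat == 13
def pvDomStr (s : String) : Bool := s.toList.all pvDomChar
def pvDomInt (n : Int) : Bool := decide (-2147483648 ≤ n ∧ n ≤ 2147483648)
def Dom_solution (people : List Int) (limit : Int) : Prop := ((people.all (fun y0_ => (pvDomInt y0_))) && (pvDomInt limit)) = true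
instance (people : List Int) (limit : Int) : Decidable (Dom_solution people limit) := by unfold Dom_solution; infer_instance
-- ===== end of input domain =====

-- B replaces A's per-round list scans and set(range(40, limit-h+1)) materialization by one sort plus a
-- binary search per boat; equivalence is about the RETURN value only (Python A zeroes `people` in place, B does not).

-- ===== PORT A =====
-- people[people.index(v)] = 0  (both call sites have v ∈ people, so Python's .index cannot raise)
def pyZeroAt (xs : List Int) (v : Int) : List Int :=
  match PySem.List.index? xs v with
  | some i => xs.set i 0
  | none => xs        -- unreachable at both call sites

-- the while-loop of A; fuel bounds the iterations (inside Pre_ each round zeroes a positive entry,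
-- so people.length rounds always suffice; outside Pre_ the Python loop can run forever)
def solutionLoopA : Nat → List Int → Int → Int → Int
  | 0, _, _, answer => answer
  | fuel + 1, people, limit, answer =>
    if people.sum ≠ 0 then
      match PySem.List.max? people (fun y => y) with    -- boat[0] = max(people)
      | none => answer                                   -- unreachable: sum ≠ 0 means people ≠ []
      | some b0 =>
        let people1 := pyZeroAt people b0
        let rest := limit - b0
        let g : PySem.Set Int :=
          PySem.Set.inter (PySem.Set.ofList (PySem.List.pyRange 40 (rest + 1))) (PySem.Set.ofList people1)
        let people2 :=
          if g.isEmpty then people1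
          else
            match PySem.List.max? g (fun y => y) with    -- boat[1] = max(g)
            | none => people1                             -- unreachable: g ≠ []
            | some b1 => pyZeroAt people1 b1
        solutionLoopA fuel people2 limit (answer + 1)
    else answer

def solution (people : List Int) (limit : Int) : Int :=
  solutionLoopA people.length people limit 0

-- ===== PORT B =====
-- the inner `while lo < hi` binary search of Source B; rem[mid] is in range (mid < hi ≤ len rem), so getD
-- is exact; fuel = hi - lo bounds the iterations (the interval shrinks by at least 1 per pass)
def bsRun (rem : List Int) (cap : Int) : Nat → Nat → Nat → Nat
  | 0, lo, _ => lo
  | fuel + 1, lo, hi =>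
    if lo < hi then
      let mid := (lo + hi) / 2
      if rem.getD mid 0 ≤ cap then bsRun rem cap fuel (mid + 1) hi else bsRun rem cap fuel lo mid
    else lo

def bsLoop (rem : List Int) (cap : Int) (lo hi : Nat) : Nat :=
  bsRun rem cap (hi - lo) lo hi

-- the outer `while rem:` loop of Source B; each round pops at least one element, so rem.length fuel is exact
def solutionLoopB : Nat → List Int → Int → Int → Int
  | 0, _, _, ans => ans
  | fuel + 1, rem, limit, ans =>
    if rem.isEmpty then ans
    else
      match PySem.List.pop? rem with                     -- h = rem.pop()
      | none => ans                                      -- unreachable: rem ≠ []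
      | some (h, rem1) =>
        let cap := limit - h
        let lo := bsLoop rem1 cap 0 rem1.length
        let rem2 :=
          if 0 < lo ∧ 40 ≤ rem1.getD (lo - 1) 0 then     -- if lo > 0 and rem[lo-1] >= 40
            match PySem.List.pop? rem1 ((lo - 1 : Nat) : Int) with   -- rem.pop(lo-1)
            | none => rem1                               -- unreachable: lo - 1 < len rem1
            | some (_, r) => r
          else rem1
        solutionLoopB fuel rem2 limit (ans + 1)

def solution_alt (people : List Int) (limit : Int) : Int :=
  let rem := PySem.List.sorted people (fun y => y)
  solutionLoopB rem.length rem limit 0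

-- ===== PRECONDITION & SPEC =====
-- Pre_ excludes exactly the nonpositive weights, which lie outside the problem's domain (weights are ≥ 40):
-- a negative weight makes A's `while sum(people) != 0` loop run forever once only nonpositive entries remain,
-- and a 0 weight is conflated with A's own removal marker, so A silently skips that person.
def Pre_solution (people : List Int) (limit : Int) : Prop :=
  ∀ p ∈ people, 1 ≤ p
instance (people : List Int) (limit : Int) : Decidable (Pre_solution people limit) := by
  unfold Pre_solution; infer_instance

def pvWitness_solution : List Int × Int := ([50, 50, 80], 100)

def Spec_solution (people : List Int) (limit : Int) (out : Int) : Prop := out = solution_alt people limit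
instance (people : List Int) (limit : Int) (out : Int) : Decidable (Spec_solution people limit out) := by
  unfold Spec_solution; infer_instance

-- ===== CLAIM (what is proved, stated in full; the proofs are below) =====
def Claim_equal_solution : Prop := ∀ (people : List Int) (limit : Int), Dom_solution people limit → Pre_solution people limit → Spec_solution people limit (solution people limit)

-- ===== LEMMAS AND PROOFS =====

-- the live (still-to-be-seated) entries of A's working list
def live (L : List Int) : List Int := L.filter (fun x => x != 0)

theorem erase_append_middle {α : Type} [BEq α] [LawfulBEq α] (a b : List α) (v : α) :
    ((a ++ v :: b).erase v).Perm (a ++ b) := by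
  induction a with
  | nil => simp
  | cons x a ih =>
    by_cases hx : x = v
    · subst hx
      simp only [List.cons_append, List.erase_cons_head]
      exact List.perm_middle
    · simp only [List.cons_append]
      rw [List.erase_cons_tail]
      · exact ih.cons x
      · simp [hx]

theorem set_append_middle {α : Type} (pre suf : List α) (v w : α) :
    (pre ++ v :: suf).set pre.length w = pre ++ w :: suf := by
  induction pre with
  | nil => rfl
  | cons x pre ih => simp [ih]

theorem live_pyZeroAt (L : List Int) (v : Int) (hv : v ∈ L) (hv0 : v ≠ 0) :
    (live (pyZeroAt L v)).Perm ((live L).erase v) := by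
  have hidx : (PySem.List.index? L v).isSome := (PySem.List.index?_isSome_iff L v).2 hv
  obtain ⟨i, hi⟩ := Option.isSome_iff_exists.1 hidx
  obtain ⟨pre, suf, hL, hlen, hvp⟩ := (PySem.List.index?_eq_some_iff L v i).1 hi
  have hzero : pyZeroAt L v = pre ++ 0 :: suf := by
    unfold pyZeroAt
    rw [hi, hL, ← hlen]
    exact set_append_middle pre suf v 0
  have h1 : live (pyZeroAt L v) = live pre ++ live suf := by
    rw [hzero]; simp [live, List.filter_append]
  have h2 : (live L).erase v = live pre ++ live suf := by
    rw [hL]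
    have : live (pre ++ v :: suf) = live pre ++ v :: live suf := by
      simp [live, List.filter_append, hv0]
    rw [this, List.erase_append_right _ (by simp [live, List.mem_filter]; intro h; exact absurd h hvp),
        List.erase_cons_head]
  rw [h1, h2]

theorem nonneg_pyZeroAt (L : List Int) (v : Int) (h : ∀ x ∈ L, 0 ≤ x) :
    ∀ x ∈ pyZeroAt L v, 0 ≤ x := by
  unfold pyZeroAt
  cases hidx : PySem.List.index? L v with
  | none => exact h
  | some i =>
    intro x hx
    rcases List.mem_or_eq_of_mem_set hx with hmem | rfl
    · exact h x hmem
    · exact le_refl 0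

theorem sum_zero_iff (L : List Int) (h : ∀ x ∈ L, 0 ≤ x) : L.sum = 0 ↔ live L = [] := by
  induction L with
  | nil => simp [live]
  | cons a t ih =>
    have ha : 0 ≤ a := h a (by simp)
    have ht : ∀ x ∈ t, 0 ≤ x := fun x hx => h x (by simp [hx])
    have hts : 0 ≤ t.sum := List.sum_nonneg ht
    by_cases h0 : a = 0
    · subst h0
      simpa [live, List.filter_cons] using ih ht
    · constructor
      · intro hsum
        exfalso
        simp only [List.sum_cons] at hsum
        omega
      · intro hnil
        exfalso
        simp [live, h0] at hnil

theorem live_pos (L : List Int) (h : ∀ x ∈ L, 0 ≤ x) : ∀ x ∈ live L, 0 < x := by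
  intro x hx
  obtain ⟨hmem, hne⟩ := List.mem_filter.1 hx
  have := h x hmem
  simp only [bne_iff_ne, ne_eq] at hne
  omega

theorem sorted_getD_mono (rem : List Int) (hs : rem.Pairwise (· ≤ ·)) (k j : Nat)
    (hkj : k ≤ j) (hj : j < rem.length) : rem.getD k 0 ≤ rem.getD j 0 := by
  rcases Nat.lt_or_ge k j with hlt | hge
  · rw [List.getD_eq_getElem rem 0 (by omega), List.getD_eq_getElem rem 0 hj]
    exact List.pairwise_iff_getElem.1 hs k j (by omega) hj hlt
  · have : k = j := by omega
    subst this; exact le_refl _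

theorem sorted_le_getLast (rem : List Int) (hs : rem.Pairwise (· ≤ ·)) (hne : rem ≠ []) :
    ∀ y ∈ rem, y ≤ rem.getLast hne := by
  intro y hy
  obtain ⟨i, hi, rfl⟩ := List.mem_iff_getElem.1 hy
  rw [List.getLast_eq_getElem hne, ← List.getD_eq_getElem rem 0 hi,
      ← List.getD_eq_getElem rem 0 (by omega)]
  exact sorted_getD_mono rem hs i (rem.length - 1) (by omega) (by omega)

theorem bsRun_spec (rem : List Int) (cap : Int) (hs : rem.Pairwise (· ≤ ·)) :
    ∀ fuel lo hi, hi - lo ≤ fuel → lo ≤ hi → hi ≤ rem.length →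
      (∀ k, k < lo → rem.getD k 0 ≤ cap) →
      (∀ k, hi ≤ k → k < rem.length → cap < rem.getD k 0) →
      lo ≤ bsRun rem cap fuel lo hi ∧ bsRun rem cap fuel lo hi ≤ hi ∧
        (∀ k, k < bsRun rem cap fuel lo hi → rem.getD k 0 ≤ cap) ∧
        (∀ k, bsRun rem cap fuel lo hi ≤ k → k < rem.length → cap < rem.getD k 0) := by
  intro fuel
  induction fuel with
  | zero =>
    intro lo hi hn hlh hhl hlo hhi
    have : lo = hi := by omega
    subst this
    exact ⟨le_refl _, le_refl _, hlo, fun k hk hklen => hhi k hk hklen⟩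
  | succ fuel ih =>
    intro lo hi hn hlh hhl hlo hhi
    rw [bsRun]
    by_cases hcmp : lo < hi
    · simp only [if_pos hcmp]
      by_cases hm : rem.getD ((lo + hi) / 2) 0 ≤ cap
      · simp only [if_pos hm]
        have hrec := ih ((lo + hi) / 2 + 1) hi (by omega) (by omega) hhl
          (fun k hk => le_trans (sorted_getD_mono rem hs k ((lo + hi) / 2) (by omega) (by omega)) hm)
          hhi
        exact ⟨by omega, hrec.2.1, hrec.2.2.1, hrec.2.2.2⟩
      · simp only [if_neg hm]
        rw [not_le] at hm
        have hrec := ih lo ((lo + hi) / 2) (by omega) (by omega) (by omega) hlo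
          (fun k hk hklen =>
            lt_of_lt_of_le hm (sorted_getD_mono rem hs ((lo + hi) / 2) k hk hklen))
        exact ⟨hrec.1, by omega, hrec.2.2.1, hrec.2.2.2⟩
    · simp only [if_neg hcmp]
      have : lo = hi := by omega
      subst this
      exact ⟨le_refl _, le_refl _, hlo, fun k hk hklen => hhi k hk hklen⟩

theorem bsLoop_spec (rem : List Int) (cap : Int) (hs : rem.Pairwise (· ≤ ·)) :
    ∀ n lo hi, hi - lo = n → lo ≤ hi → hi ≤ rem.length →
      (∀ k, k < lo → rem.getD k 0 ≤ cap) →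
      (∀ k, hi ≤ k → k < rem.length → cap < rem.getD k 0) →
      lo ≤ bsLoop rem cap lo hi ∧ bsLoop rem cap lo hi ≤ hi ∧
        (∀ k, k < bsLoop rem cap lo hi → rem.getD k 0 ≤ cap) ∧
        (∀ k, bsLoop rem cap lo hi ≤ k → k < rem.length → cap < rem.getD k 0) := by
  intro n lo hi hn hlh hhl hlo hhi
  exact bsRun_spec rem cap hs (hi - lo) lo hi (le_refl _) hlh hhl hlo hhi

-- one unfolding step of each loop (used by loop_eq below)
theorem loopA_step (fuel : Nat) (L : List Int) (limit ans : Int)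
    (hsum : L.sum ≠ 0) (m : Int) (hmax : PySem.List.max? L (fun y => y) = some m) :
    solutionLoopA (fuel + 1) L limit ans =
      solutionLoopA fuel
        (let people1 := pyZeroAt L m
         let g : PySem.Set Int :=
           PySem.Set.inter (PySem.Set.ofList (PySem.List.pyRange 40 (limit - m + 1)))
             (PySem.Set.ofList people1)
         if g.isEmpty then people1
         else
           match PySem.List.max? g (fun y => y) with
           | none => people1
           | some b1 => pyZeroAt people1 b1)
        limit (ans + 1) := by
  simp only [solutionLoopA, if_pos hsum, hmax]

theorem loopB_step (fuel : Nat) (t : List Int) (limit ans h : Int) :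
    solutionLoopB (fuel + 1) (t ++ [h]) limit ans =
      solutionLoopB fuel
        (let cap := limit - h
         let lo := bsLoop t cap 0 t.length
         if 0 < lo ∧ 40 ≤ t.getD (lo - 1) 0 then
           match PySem.List.pop? t ((lo - 1 : Nat) : Int) with
           | none => t
           | some (_, r) => r
         else t)
        limit (ans + 1) := by
  have hne : (t ++ [h]).isEmpty = false := by simp
  simp only [solutionLoopB, hne, PySem.List.pop?_last, Bool.false_eq_true, if_false]

theorem loop_eq (fuel : Nat) : ∀ (L rem : List Int) (limit ans : Int),
    (∀ x ∈ L, 0 ≤ x) → rem.Pairwise (· ≤ ·) → rem.Perm (live L) →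
    solutionLoopA fuel L limit ans = solutionLoopB fuel rem limit ans := by
  induction fuel with
  | zero => intro L rem limit ans _ _ _; rfl
  | succ fuel ih =>
    intro L rem limit ans hL hs hperm
    by_cases hsum : L.sum = 0
    · have hlive : live L = [] := (sum_zero_iff L hL).1 hsum
      have hrem : rem = [] := by rw [hlive] at hperm; exact hperm.eq_nil
      simp [solutionLoopA, solutionLoopB, hsum, hrem]
    · have hlive : live L ≠ [] := fun h => hsum ((sum_zero_iff L hL).2 h)
      have hrem : rem ≠ [] := by
        intro h; rw [h] at hperm; exact hlive hperm.symm.eq_nil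
      cases hmax : PySem.List.max? L (fun y => y) with
      | none =>
        exfalso
        have : L = [] := (PySem.List.max?_eq_none_iff L _).1 hmax
        rw [this] at hlive; exact hlive rfl
      | some m =>
        have hm_mem : m ∈ L := PySem.List.max?_mem hmax
        have hm_max : ∀ y ∈ L, y ≤ m := fun y hy => PySem.List.max?_isMax hmax y hy
        have hm_ne : m ≠ 0 := by
          obtain ⟨y, hy⟩ := List.exists_mem_of_ne_nil _ hlive
          have h1 := live_pos L hL y hy
          have h2 := hm_max y (List.mem_filter.1 hy).1
          omega
        have hm_live : m ∈ live L := List.mem_filter.2 ⟨hm_mem, by simp [hm_ne]⟩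
        have hm_rem : m ∈ rem := hperm.mem_iff.2 hm_live
        have hlast_eq : rem.getLast hrem = m := by
          apply le_antisymm
          · exact hm_max _ (List.mem_filter.1 (hperm.mem_iff.1 (List.getLast_mem hrem))).1
          · exact sorted_le_getLast rem hs hrem m hm_rem
        have hdecomp : rem = rem.dropLast ++ [m] := by
          rw [← hlast_eq]; exact (List.dropLast_append_getLast hrem).symm
        set t := rem.dropLast with ht
        set people1 := pyZeroAt L m with hpeople1
        have hL1 : ∀ x ∈ people1, 0 ≤ x := nonneg_pyZeroAt L m hL
        have hs1 : t.Pairwise (· ≤ ·) := List.Pairwise.sublist (List.dropLast_sublist rem) hs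
        have hperm1 : t.Perm (live people1) := by
          have e1 : (live people1).Perm ((live L).erase m) := live_pyZeroAt L m hm_mem hm_ne
          have e2 : (rem.erase m).Perm ((live L).erase m) := hperm.erase m
          have e3 : (rem.erase m).Perm t := by
            rw [hdecomp]
            simpa using erase_append_middle t [] m
          exact (e3.symm.trans e2).trans e1.symm
        set lo := bsLoop t (limit - m) 0 t.length with hlo
        have hbs := bsLoop_spec t (limit - m) hs1 t.length 0 t.length rfl (by omega)
          (le_refl _) (fun k hk => absurd hk (by omega)) (fun k hk hkl => absurd hkl (by omega))
        obtain ⟨-, hbs2, hbs3, hbs4⟩ := hbs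
        have hg_mem : ∀ v : Int,
            (v ∈ PySem.Set.inter (PySem.Set.ofList (PySem.List.pyRange 40 (limit - m + 1)))
              (PySem.Set.ofList people1)) ↔ (v ∈ people1 ∧ 40 ≤ v ∧ v ≤ limit - m) := by
          intro v
          rw [PySem.Set.mem_inter, PySem.Set.mem_ofList, PySem.Set.mem_ofList,
            PySem.List.mem_pyRange_one]
          constructor
          · rintro ⟨⟨h1, h2⟩, h3⟩; exact ⟨h3, h1, by omega⟩
          · rintro ⟨h3, h1, h2⟩; exact ⟨⟨h1, by omega⟩, h3⟩
        rw [hdecomp, loopB_step, loopA_step fuel L limit ans hsum m hmax]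
        simp only [← hpeople1, ← hlo]
        by_cases hcond : 0 < lo ∧ 40 ≤ t.getD (lo - 1) 0
        · obtain ⟨hlo_pos, hb40⟩ := hcond
          have hlt : lo - 1 < t.length := by omega
          have hb_mem_t : t.getD (lo - 1) 0 ∈ t := by
            rw [List.getD_eq_getElem t 0 hlt]; exact List.getElem_mem hlt
          have hb_cap : t.getD (lo - 1) 0 ≤ limit - m := hbs3 (lo - 1) (by omega)
          have hb_p1 : t.getD (lo - 1) 0 ∈ people1 :=
            (List.mem_filter.1 (hperm1.mem_iff.1 hb_mem_t)).1
          have hb_g : t.getD (lo - 1) 0 ∈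
              PySem.Set.inter (PySem.Set.ofList (PySem.List.pyRange 40 (limit - m + 1)))
                (PySem.Set.ofList people1) :=
            (hg_mem _).2 ⟨hb_p1, hb40, hb_cap⟩
          have hg_ne : PySem.Set.inter (PySem.Set.ofList (PySem.List.pyRange 40 (limit - m + 1)))
              (PySem.Set.ofList people1) ≠ [] := by
            intro h; rw [h] at hb_g; simp at hb_g
          have hg_empty : (PySem.Set.inter
              (PySem.Set.ofList (PySem.List.pyRange 40 (limit - m + 1)))
              (PySem.Set.ofList people1)).isEmpty = false := by
            rw [List.isEmpty_eq_false_iff]; exact hg_ne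
          cases hmaxg : PySem.List.max? (PySem.Set.inter
              (PySem.Set.ofList (PySem.List.pyRange 40 (limit - m + 1)))
              (PySem.Set.ofList people1)) (fun y => y) with
          | none => exact absurd ((PySem.List.max?_eq_none_iff _ _).1 hmaxg) hg_ne
          | some b1 =>
            have hb1_eq : b1 = t.getD (lo - 1) 0 := by
              apply le_antisymm
              · obtain ⟨hb1_p1, hb1_40, hb1_cap⟩ := (hg_mem b1).1 (PySem.List.max?_mem hmaxg)
                have hb1_live : b1 ∈ live people1 :=
                  List.mem_filter.2 ⟨hb1_p1, by simp; omega⟩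
                have hb1_t : b1 ∈ t := hperm1.mem_iff.2 hb1_live
                obtain ⟨k, hk, hbk⟩ := List.mem_iff_getElem.1 hb1_t
                have hk_lo : k < lo := by
                  by_contra hge
                  have := hbs4 k (by omega) hk
                  rw [List.getD_eq_getElem t 0 hk, hbk] at this
                  omega
                calc b1 = t.getD k 0 := by rw [List.getD_eq_getElem t 0 hk, hbk]
                  _ ≤ t.getD (lo - 1) 0 := sorted_getD_mono t hs1 k (lo - 1) (by omega) hlt
              · exact PySem.List.max?_isMax hmaxg _ hb_g
            have hpop2 : PySem.List.pop? t ((lo - 1 : Nat) : Int) =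
                some (t[lo - 1], t.eraseIdx (lo - 1)) := PySem.List.pop?_natCast t (lo - 1) hlt
            have hcondT : 0 < lo ∧ 40 ≤ t.getD (lo - 1) 0 := ⟨hlo_pos, hb40⟩
            rw [if_pos hcondT, hpop2]
            rw [hg_empty]
            simp only [Bool.false_eq_true, if_false]
            have hb_ne : t.getD (lo - 1) 0 ≠ 0 := by omega
            have hs2 : (t.eraseIdx (lo - 1)).Pairwise (· ≤ ·) :=
              List.Pairwise.sublist (List.eraseIdx_sublist t (lo - 1)) hs1
            have hL2 : ∀ x ∈ pyZeroAt people1 b1, 0 ≤ x := nonneg_pyZeroAt people1 b1 hL1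
            have hperm2 : (t.eraseIdx (lo - 1)).Perm (live (pyZeroAt people1 b1)) := by
              have e1 : (live (pyZeroAt people1 b1)).Perm ((live people1).erase b1) :=
                live_pyZeroAt people1 b1 (hb1_eq ▸ hb_p1) (hb1_eq ▸ hb_ne)
              have htd : t = t.take (lo - 1) ++ t.getD (lo - 1) 0 :: t.drop lo := by
                conv_lhs => rw [← List.take_append_drop (lo - 1) t]
                congr 1
                rw [List.getD_eq_getElem t 0 hlt]
                have h5 := List.getElem_cons_drop hlt
                rw [show lo - 1 + 1 = lo by omega] at h5
                exact h5.symm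
              have htd' : t = t.take (lo - 1) ++ b1 :: t.drop lo := by
                rw [hb1_eq]; exact htd
              have e2 : (t.erase b1).Perm (t.eraseIdx (lo - 1)) := by
                rw [List.eraseIdx_eq_take_drop_succ, show lo - 1 + 1 = lo by omega]
                conv_lhs => rw [htd']
                exact erase_append_middle (t.take (lo - 1)) (t.drop lo) b1
              have e3 : (t.erase b1).Perm ((live people1).erase b1) := hperm1.erase b1
              exact (e2.symm.trans e3).trans e1.symm
            exact ih (pyZeroAt people1 b1) (t.eraseIdx (lo - 1)) limit (ans + 1) hL2 hs2 hperm2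
        · have hg_nil : PySem.Set.inter (PySem.Set.ofList (PySem.List.pyRange 40 (limit - m + 1)))
              (PySem.Set.ofList people1) = [] := by
            by_contra hne
            obtain ⟨v, hv⟩ := List.exists_mem_of_ne_nil _ hne
            obtain ⟨hv_p1, hv_40, hv_cap⟩ := (hg_mem v).1 hv
            have hv_live : v ∈ live people1 := List.mem_filter.2 ⟨hv_p1, by simp; omega⟩
            have hv_t : v ∈ t := hperm1.mem_iff.2 hv_live
            obtain ⟨k, hk, hvk⟩ := List.mem_iff_getElem.1 hv_t
            have hk_lo : k < lo := by
              by_contra hge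
              have := hbs4 k (by omega) hk
              rw [List.getD_eq_getElem t 0 hk, hvk] at this
              omega
            apply hcond
            refine ⟨by omega, ?_⟩
            calc (40 : Int) ≤ v := hv_40
              _ = t.getD k 0 := by rw [List.getD_eq_getElem t 0 hk, hvk]
              _ ≤ t.getD (lo - 1) 0 := sorted_getD_mono t hs1 k (lo - 1) (by omega) (by omega)
          rw [if_neg hcond, hg_nil]
          simp only [List.isEmpty_nil, if_true]
          exact ih people1 t limit (ans + 1) hL1 hs1 hperm1

-- ===== VERDICT (by name: the statement is the Claim_ definition above) =====
theorem solution_spec : Claim_equal_solution := by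
  intro people limit _hdom hpre
  unfold Spec_solution solution solution_alt
  have hperm : (PySem.List.sorted people (fun y => y)).Perm people := PySem.List.sorted_perm _ _ _
  have hlen : (PySem.List.sorted people (fun y => y)).length = people.length := hperm.length_eq
  show solutionLoopA people.length people limit 0
      = solutionLoopB (PySem.List.sorted people (fun y => y)).length (PySem.List.sorted people (fun y => y)) limit 0
  rw [hlen]
  refine loop_eq people.length people _ limit 0 (fun x hx => le_trans (by norm_num) (hpre x hx))
    (PySem.List.sorted_pairwise people (fun y => y)) ?_
  have : live people = people := by
    apply List.filter_eq_self.2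
    intro a ha
    have := hpre a ha
    simp only [bne_iff_ne, ne_eq]
    omega
  rw [this]
  exact hperm
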